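-- pv_equiv track=rewrite | github.com/tusharmahuri/post_processing_library | my_module.py | named_entity_recognition
-- ===== SOURCE A (Python) =====
-- def named_entity_recognition(truth_list, prediction_list):
--     correct_entities = 0
--     missed_entities = 0
--     false_positive_entities = 0
--     truth_list = [item.lower() for item in truth_list]
--     prediction_list = [item.lower() for item in prediction_list]
--
--     for truth_value in truth_list:
--         found = False
--         for predicted_value in prediction_list:
--             if predicted_value in truth_value or truth_value in predicted_value:
--                 correct_entities += 1
--                 found = True
--                 break
--         if not found:
--             missed_entities += 1
--
--     for predicted_value in prediction_list:
--         found = False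
--         for truth_value in truth_list:
--             if predicted_value in truth_value or truth_value in predicted_value:
--                 found = True
--                 break
--         if not found:
--             false_positive_entities += 1
--
--     return correct_entities, missed_entities, false_positive_entities
-- ===== SOURCE B (Python) =====
-- def named_entity_recognition(truth_list, prediction_list):
--     truths = [t.lower() for t in truth_list]
--     preds = [p.lower() for p in prediction_list]
--     truth_flags = [False] * len(truths)
--     pred_flags = [False] * len(preds)
--     for i, t in enumerate(truths):
--         for j, p in enumerate(preds):
--             if p in t or t in p:
--                 truth_flags[i] = True
--                 pred_flags[j] = True
--     correct = sum(truth_flags)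
--     missed = len(truths) - correct
--     false_positive = len(preds) - sum(pred_flags)
--     return correct, missed, false_positive
-- ===== Notes on version B (the rewrite author's own statement) =====
-- stated objective: alternative
-- what changed: B replaces A's two separate existence scans (each with an early break) by a single full nested pass that maintains two boolean match-flag arrays, then derives all three counts from the flags.
import Mathlib
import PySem

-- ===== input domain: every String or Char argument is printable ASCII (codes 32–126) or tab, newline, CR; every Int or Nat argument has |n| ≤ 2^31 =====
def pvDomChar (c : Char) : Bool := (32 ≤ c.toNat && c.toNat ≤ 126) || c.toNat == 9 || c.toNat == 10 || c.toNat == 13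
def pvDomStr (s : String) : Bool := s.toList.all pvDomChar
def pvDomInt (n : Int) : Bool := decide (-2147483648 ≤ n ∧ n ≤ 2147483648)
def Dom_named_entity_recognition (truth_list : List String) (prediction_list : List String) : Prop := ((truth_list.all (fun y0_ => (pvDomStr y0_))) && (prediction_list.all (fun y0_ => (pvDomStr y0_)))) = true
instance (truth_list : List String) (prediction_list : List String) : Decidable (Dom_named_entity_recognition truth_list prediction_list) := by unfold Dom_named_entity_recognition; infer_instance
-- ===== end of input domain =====

-- B replaces A's two separate break-on-first-match existence scans by one full nested pass
-- maintaining two boolean match-flag arrays; same cost, alternative decomposition.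

-- ===== PORT A =====
-- 'predicted_value in truth_value or truth_value in predicted_value'
def nerMatch (p t : String) : Bool := PySem.Str.isIn p t || PySem.Str.isIn t p

-- first loop: per truth, inner scan with break (existence); state (correct, missed)
def nerLoop1 (pl : List String) : List String → Int × Int → Int × Int
  | [], s => s
  | t :: ts, (c, m) =>
      if pl.any (fun p => nerMatch p t) then nerLoop1 pl ts (c + 1, m)
      else nerLoop1 pl ts (c, m + 1)

-- second loop: per prediction, inner scan with break (existence); state false_positive
def nerLoop2 (tl : List String) : List String → Int → Int
  | [], f => f
  | p :: ps, f =>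
      if tl.any (fun t => nerMatch p t) then nerLoop2 tl ps f
      else nerLoop2 tl ps (f + 1)

def named_entity_recognition (truth_list : List String) (prediction_list : List String) : Int × Int × Int :=
  let tl := truth_list.map PySem.Str.lower
  let pl := prediction_list.map PySem.Str.lower
  let cm := nerLoop1 pl tl (0, 0)
  let fp := nerLoop2 tl pl 0
  (cm.1, cm.2, fp)

-- ===== PORT B =====
-- inner loop over the predictions in lockstep with their flag array:
-- returns (did the current truth match anything, updated prediction flags)
def nerInner (t : String) : List String → List Bool → Bool × List Bool
  | [], fs => (false, fs)
  | _ :: _, [] => (false, [])   -- unreachable: flags has the same length as preds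
  | p :: ps, f :: fs =>
      let hit := nerMatch p t
      let r := nerInner t ps fs
      (hit || r.1, (f || hit) :: r.2)

-- outer loop over the truths: builds the truth flags, threads the prediction flags
def nerOuter (ps : List String) : List String → List Bool → List Bool × List Bool
  | [], pf => ([], pf)
  | t :: ts, pf =>
      let r := nerInner t ps pf
      let r' := nerOuter ps ts r.2
      (r.1 :: r'.1, r'.2)

def nerCountTrue (fs : List Bool) : Int := (fs.countP (fun b => b) : Int)

def named_entity_recognition_alt (truth_list : List String) (prediction_list : List String) : Int × Int × Int :=
  let truths := truth_list.map PySem.Str.lower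
  let preds := prediction_list.map PySem.Str.lower
  let flags := nerOuter preds truths (List.replicate preds.length false)
  let correct := nerCountTrue flags.1
  let missed := (truths.length : Int) - correct
  let falsePositive := (preds.length : Int) - nerCountTrue flags.2
  (correct, missed, falsePositive)

-- ===== PRECONDITION & SPEC =====
def Spec_named_entity_recognition (truth_list : List String) (prediction_list : List String) (out : Int × Int × Int) : Prop := out = named_entity_recognition_alt truth_list prediction_list
instance (truth_list : List String) (prediction_list : List String) (out : Int × Int × Int) : Decidable (Spec_named_entity_recognition truth_list prediction_list out) := by unfold Spec_named_entity_recognition; infer_instance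

-- ===== CLAIM (what is proved, stated in full; the proofs are below) =====
def Claim_equal_named_entity_recognition : Prop := ∀ (truth_list : List String) (prediction_list : List String), Dom_named_entity_recognition truth_list prediction_list → Spec_named_entity_recognition truth_list prediction_list (named_entity_recognition truth_list prediction_list)

-- ===== LEMMAS AND PROOFS =====

lemma nerInner_eq (t : String) (ps : List String) (fs : List Bool)
    (h : fs.length = ps.length) :
    nerInner t ps fs =
      (ps.any (fun p => nerMatch p t),
       List.zipWith (fun f p => f || nerMatch p t) fs ps) := by
  induction ps generalizing fs with
  | nil => cases fs with
    | nil => simp [nerInner]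
    | cons => simp at h
  | cons p ps ih =>
    cases fs with
    | nil => simp at h
    | cons f fs =>
      simp only [List.length_cons, Nat.succ_inj] at h
      simp [nerInner, ih fs h]

lemma zipWith_fst (pf : List Bool) (ps : List String) (h : pf.length = ps.length) :
    List.zipWith (fun f (_ : String) => f) pf ps = pf := by
  induction ps generalizing pf with
  | nil => cases pf with
    | nil => simp
    | cons => simp at h
  | cons p ps ih =>
    cases pf with
    | nil => simp at h
    | cons f fs =>
      simp only [List.length_cons, Nat.succ_inj] at h
      simp [ih fs h]

lemma zipWith_or_or (q r : String → Bool) (pf : List Bool) (ps : List String) :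
    List.zipWith (fun f p => f || q p) (List.zipWith (fun f p => f || r p) pf ps) ps
      = List.zipWith (fun f p => f || (r p || q p)) pf ps := by
  induction ps generalizing pf with
  | nil => simp
  | cons p ps ih =>
    cases pf with
    | nil => simp
    | cons f fs => simp [ih, Bool.or_assoc]

lemma nerOuter_eq (ps : List String) (ts : List String) (pf : List Bool)
    (h : pf.length = ps.length) :
    nerOuter ps ts pf =
      (ts.map (fun t => ps.any (fun p => nerMatch p t)),
       List.zipWith (fun f p => f || ts.any (fun t => nerMatch p t)) pf ps) := by
  induction ts generalizing pf with
  | nil =>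
    simp only [nerOuter, List.map_nil, Prod.mk.injEq, true_and, List.any_nil]
    have he : (fun f (_ : String) => f || false) = (fun f (_ : String) => f) := by
      funext f p; simp
    rw [he, zipWith_fst pf ps h]
  | cons t ts ih =>
    simp only [nerOuter, nerInner_eq t ps pf h]
    rw [ih _ (by simp [h])]
    simp only [List.map_cons, List.any_cons, zipWith_or_or]

lemma nerLoop1_eq (pl : List String) (ts : List String) (c m : Int) :
    nerLoop1 pl ts (c, m) =
      (c + (ts.countP (fun t => pl.any (fun p => nerMatch p t)) : Int),
       m + (ts.countP (fun t => !(pl.any (fun p => nerMatch p t))) : Int)) := by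
  induction ts generalizing c m with
  | nil => simp [nerLoop1]
  | cons t ts ih =>
    by_cases h : pl.any (fun p => nerMatch p t) = true <;>
      [skip; rw [Bool.not_eq_true] at h] <;>
      simp [nerLoop1, h, ih] <;> ring

lemma nerLoop2_eq (tl : List String) (ps : List String) (f : Int) :
    nerLoop2 tl ps f =
      f + (ps.countP (fun p => !(tl.any (fun t => nerMatch p t))) : Int) := by
  induction ps generalizing f with
  | nil => simp [nerLoop2]
  | cons p ps ih =>
    by_cases h : tl.any (fun t => nerMatch p t) = true <;>
      [skip; rw [Bool.not_eq_true] at h] <;>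
      simp [nerLoop2, h, ih] <;> ring

lemma countP_not_eq {a : Type} (l : List a) (q : a → Bool) :
    (l.countP (fun x => !(q x)) : Int) = (l.length : Int) - (l.countP q : Int) := by
  have h1 := List.length_eq_countP_add_countP (l := l) (p := q)
  have h2 : l.countP (fun x => ¬ q x = true) = l.countP (fun x => !(q x)) := by
    apply List.countP_congr; intro x _; simp
  omega

-- B's flag lists reduce to countP over the lowered lists
lemma nerCountTrue_map {a : Type} (l : List a) (q : a → Bool) :
    nerCountTrue (l.map q) = (l.countP q : Int) := by
  simp [nerCountTrue, List.countP_map, Function.comp_def]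

lemma nerCountTrue_zipWith_false (ps : List String) (q : String → Bool) :
    nerCountTrue (List.zipWith (fun f p => f || q p) (List.replicate ps.length false) ps)
      = (ps.countP q : Int) := by
  have h : List.zipWith (fun f p => f || q p) (List.replicate ps.length false) ps
      = ps.map q := by
    induction ps with
    | nil => simp
    | cons p ps ih => simpa [List.replicate_succ] using ih
  rw [h, nerCountTrue_map]

-- ===== VERDICT (by name: the statement is the Claim_ definition above) =====
theorem named_entity_recognition_spec : Claim_equal_named_entity_recognition := by
  intro truth_list prediction_list _
  unfold Spec_named_entity_recognition
  simp only [named_entity_recognition, named_entity_recognition_alt]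
  rw [nerOuter_eq _ _ _ (by simp), nerLoop1_eq, nerLoop2_eq]
  simp only [nerCountTrue_map, nerCountTrue_zipWith_false, countP_not_eq, zero_add]
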